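-- pv_equiv track=rewrite | github.com/prashansa012/python_questions | find_missing_in_consecutive.py | missing_consecutive_number
-- ===== SOURCE A (Python) =====
-- def missing_consecutive_number(nums:list)->int:
--     """
--     missing_consecutive_number function  finds the missing number in a consecutive list
--
--
--     :param nums: list type
--     :return: returns a missing integer
--     :raise: handles TypeError if the input is not a list
--     """
--     if not isinstance(nums,list):
--         raise TypeError("input must be a list of integers")
--     for i in range(0,len(nums)-1):
--         if nums[i] == nums[i+1]-1:
--             continue
--         else:
--             return( nums[i]+1)
-- ===== SOURCE B (Python) =====
-- def missing_consecutive_number(nums: list) -> int: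
--     """Compare the list against the arithmetic progression it should be,
--     returning the first expected value that does not appear."""
--     if not isinstance(nums, list):
--         raise TypeError("input must be a list of integers")
--     if not nums:
--         return None
--     for v, e in zip(nums, range(nums[0], nums[0] + len(nums))):
--         if v != e:
--             return e
--     return None
-- ===== Notes on version B (the rewrite author's own statement) =====
-- stated objective: alternative
-- what changed: B zips the list against the expected arithmetic progression (a range starting at the first element) and returns the first expected value that is absent, instead of A's index loop comparing each element with its successor.
import Mathlib
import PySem

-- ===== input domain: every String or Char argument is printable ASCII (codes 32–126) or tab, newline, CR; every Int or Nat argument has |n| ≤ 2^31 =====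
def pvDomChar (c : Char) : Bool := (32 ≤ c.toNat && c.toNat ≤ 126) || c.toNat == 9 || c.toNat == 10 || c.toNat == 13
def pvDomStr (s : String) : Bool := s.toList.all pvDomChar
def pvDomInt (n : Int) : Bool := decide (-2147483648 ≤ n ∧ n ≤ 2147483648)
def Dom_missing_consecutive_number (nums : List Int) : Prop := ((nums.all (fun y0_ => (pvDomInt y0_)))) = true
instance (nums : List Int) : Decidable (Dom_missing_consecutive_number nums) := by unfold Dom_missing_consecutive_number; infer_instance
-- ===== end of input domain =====

-- B compares the list against the expected arithmetic progression instead of A's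
-- neighbour-to-neighbour index loop (objective: alternative, same O(n) cost).

-- ===== PORT A =====
-- the 'for i in range(0, len(nums)-1)' loop with its early return, as recursion over the index list
def pvAGo (nums : List Int) : List Int → Option Int
  | [] => none
  | i :: rest =>
    match PySem.List.pyGet? nums i, PySem.List.pyGet? nums (i + 1) with
    | some a, some b => if a = b - 1 then pvAGo nums rest else some (a + 1)
    | _, _ => none  -- unreachable: every index the range produces is in bounds

def missing_consecutive_number (nums : List Int) : Option Int :=
  pvAGo nums (PySem.List.pyRange 0 ((nums.length : Int) - 1) 1)

-- ===== PORT B =====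
-- the 'for v, e in zip(nums, range(nums[0], nums[0]+len(nums)))' loop with its early return
def pvBGo : List (Int × Int) → Option Int
  | [] => none
  | (v, e) :: rest => if v ≠ e then some e else pvBGo rest

def missing_consecutive_number_alt (nums : List Int) : Option Int :=
  match nums with
  | [] => none
  | n0 :: _ => pvBGo (nums.zip (PySem.List.pyRange n0 (n0 + (nums.length : Int)) 1))

-- ===== PRECONDITION & SPEC =====
def Spec_missing_consecutive_number (nums : List Int) (out : Option Int) : Prop := out = missing_consecutive_number_alt nums
instance (nums : List Int) (out : Option Int) : Decidable (Spec_missing_consecutive_number nums out) := by unfold Spec_missing_consecutive_number; infer_instance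

-- ===== CLAIM (what is proved, stated in full; the proofs are below) =====
def Claim_equal_missing_consecutive_number : Prop := ∀ (nums : List Int), Dom_missing_consecutive_number nums → Spec_missing_consecutive_number nums (missing_consecutive_number nums)

-- ===== LEMMAS AND PROOFS =====

-- reference form: first adjacent pair that is not consecutive
def pvRef : List Int → Option Int
  | [] => none
  | [_] => none
  | a :: b :: t => if a = b - 1 then pvRef (b :: t) else some (a + 1)

-- reference form of B's loop: first element differing from the counter
def pvRefB (c : Int) : List Int → Option Int
  | [] => none
  | x :: t => if x ≠ c then some c else pvRefB (c + 1) t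

theorem pvAGo_eq_ref : ∀ (post pre : List Int),
    pvAGo (pre ++ post) (PySem.List.pyRange (pre.length : Int) (((pre ++ post).length : Int) - 1) 1) = pvRef post := by
  intro post
  induction post with
  | nil =>
    intro pre
    rw [PySem.List.pyRange_one_eq_nil (by simp)]
    rfl
  | cons a post' ih =>
    intro pre
    cases post' with
    | nil =>
      rw [PySem.List.pyRange_one_eq_nil (by simp)]
      rfl
    | cons b t =>
      rw [PySem.List.pyRange_one_cons (by simp; omega)]
      show pvAGo _ _ = _
      unfold pvAGo
      rw [PySem.List.pyGet?_append_length pre (b :: t) a]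
      have h2 : PySem.List.pyGet? (pre ++ a :: b :: t) ((pre.length : Int) + 1) = some b := by
        have heq : pre ++ a :: b :: t = (pre ++ [a]) ++ b :: t := by simp
        have hl : ((pre ++ [a]).length : Int) = (pre.length : Int) + 1 := by simp
        rw [heq, ← hl]
        exact PySem.List.pyGet?_append_length (pre ++ [a]) t b
      rw [h2]
      show (if a = b - 1 then
              pvAGo (pre ++ a :: b :: t)
                (PySem.List.pyRange ((pre.length : Int) + 1) (((pre ++ a :: b :: t).length : Int) - 1) 1)
            else some (a + 1)) = pvRef (a :: b :: t)
      have hIH := ih (pre ++ [a])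
      have heq : pre ++ [a] ++ b :: t = pre ++ a :: b :: t := by simp
      have hl : ((pre ++ [a]).length : Int) = (pre.length : Int) + 1 := by simp
      rw [heq, hl] at hIH
      have hr : pvRef (a :: b :: t) = if a = b - 1 then pvRef (b :: t) else some (a + 1) := rfl
      by_cases hab : a = b - 1
      · rw [if_pos hab, hIH, hr, if_pos hab]
      · rw [if_neg hab, hr, if_neg hab]

theorem pvBGo_eq_refB : ∀ (l : List Int) (c : Int),
    pvBGo (l.zip (PySem.List.pyRange c (c + (l.length : Int)) 1)) = pvRefB c l := by
  intro l
  induction l with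
  | nil => intro c; rfl
  | cons x t ih =>
    intro c
    rw [PySem.List.pyRange_one_cons (by simp)]
    show pvBGo ((x, c) :: t.zip (PySem.List.pyRange (c + 1) (c + ((x :: t).length : Int)) 1)) = _
    have harg : c + ((x :: t).length : Int) = (c + 1) + (t.length : Int) := by
      simp; omega
    rw [harg]
    unfold pvBGo pvRefB
    rw [ih (c + 1)]

theorem pvRefB_eq_ref : ∀ (t : List Int) (a : Int), pvRefB (a + 1) t = pvRef (a :: t) := by
  intro t
  induction t with
  | nil => intro a; rfl
  | cons b t' ih =>
    intro a
    unfold pvRefB pvRef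
    by_cases h : a = b - 1
    · have hb : ¬ b ≠ a + 1 := by omega
      rw [if_neg hb, if_pos h]
      have hx : a + 1 + 1 = b + 1 := by omega
      rw [hx]
      exact ih b
    · have hb : b ≠ a + 1 := by omega
      rw [if_pos hb, if_neg h]

-- ===== VERDICT (by name: the statement is the Claim_ definition above) =====
theorem missing_consecutive_number_spec : Claim_equal_missing_consecutive_number := by
  intro nums _
  unfold Spec_missing_consecutive_number
  have hA : missing_consecutive_number nums = pvRef nums := by
    have := pvAGo_eq_ref nums []
    simpa [missing_consecutive_number] using this
  cases nums with
  | nil => simp [hA, missing_consecutive_number_alt, pvRef]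
  | cons n0 rest =>
    rw [hA]
    show pvRef (n0 :: rest) =
      pvBGo ((n0 :: rest).zip (PySem.List.pyRange n0 (n0 + ((n0 :: rest).length : Int)) 1))
    rw [pvBGo_eq_refB (n0 :: rest) n0]
    show pvRef (n0 :: rest) = (if n0 ≠ n0 then some n0 else pvRefB (n0 + 1) rest)
    rw [if_neg (by simp)]
    exact (pvRefB_eq_ref rest n0).symm
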